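-- pv_equiv track=rewrite | github.com/DitrikhAndriy/python_dpr1_km13_ditrikh | hangman.py | match_with_gaps
-- ===== SOURCE A (Python) =====
-- def match_with_gaps(my_word, other_word):
--   '''
--   my_word: string with _ characters, current guess of secret word
--   other_word: string, regular English word
--   returns: boolean, True if all the actual letters of my_word match the
--       corresponding letters of other_word, or the letter is the special symbol
--       _ , and my_word and other_word are of the same length;
--       False otherwise:
--   '''
--   my_word = my_word.replace(" ", "")
--   if len(my_word) != len(other_word):
--     return False
--   else:
--     j = 0
--     for i in my_word:
--       if i == "_":
--         j += 1
--         continue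
--       elif my_word[j] == other_word[j]:
--         j += 1
--         continue
--       else:
--         return False
--   return True
-- ===== SOURCE B (Python) =====
-- def match_with_gaps(my_word, other_word):
--     # Two-stack right-to-left consumption: no length precheck, no indices;
--     # leftover elements on either stack mean a length mismatch.
--     a = list(my_word.replace(" ", ""))
--     b = list(other_word)
--     while a and b:
--         x = a.pop()
--         y = b.pop()
--         if x != "_" and x != y:
--             return False
--     return not a and not b
-- ===== Notes on version B (the rewrite author's own statement) =====
-- stated objective: alternative
-- what changed: Replaces A's upfront length check plus left-to-right indexed scan (j counter, my_word[j]/other_word[j]) by a two-stack back-to-front consumption that pops a character from each side per step and detects length mismatch by leftovers.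
import Mathlib
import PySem

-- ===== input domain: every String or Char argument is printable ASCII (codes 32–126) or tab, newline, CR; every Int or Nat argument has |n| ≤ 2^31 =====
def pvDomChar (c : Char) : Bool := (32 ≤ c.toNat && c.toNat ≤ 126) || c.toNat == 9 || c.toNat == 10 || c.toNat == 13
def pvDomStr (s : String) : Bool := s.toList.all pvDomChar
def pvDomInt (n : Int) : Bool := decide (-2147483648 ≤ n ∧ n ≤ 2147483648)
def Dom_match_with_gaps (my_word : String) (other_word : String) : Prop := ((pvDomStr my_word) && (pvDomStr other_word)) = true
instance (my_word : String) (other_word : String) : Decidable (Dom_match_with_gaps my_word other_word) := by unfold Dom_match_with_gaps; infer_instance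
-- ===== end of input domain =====

-- B replaces A's length precheck + indexed left-to-right scan by a two-stack
-- back-to-front consumption (alternative decomposition, same O(n) cost).


-- ===== PORT A =====
-- the 'for i in my_word' loop with counter j; w/o are the full strings for the
-- my_word[j]/other_word[j] lookups (in range whenever reached, since j < len)
def pvLoopA (w o : List Char) (rest : List Char) (j : Nat) : Bool :=
  match rest with
  | [] => true
  | i :: rs =>
    if i = '_' then pvLoopA w o rs (j + 1)
    else
      match PySem.List.pyGet? w (j : Int), PySem.List.pyGet? o (j : Int) with
      | some a, some b => if a = b then pvLoopA w o rs (j + 1) else false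
      | _, _ => false   -- IndexError; unreachable (j < length on every reached step)

def match_with_gaps (my_word : String) (other_word : String) : Bool :=
  let mw := PySem.Str.replace my_word " " ""
  if PySem.Str.len mw ≠ PySem.Str.len other_word then false
  else pvLoopA mw.toList other_word.toList mw.toList 0

-- ===== PORT B =====
-- the while loop popping the LAST element of each list each iteration; the two
-- stacks are represented reversed, so Python's a.pop() is the head here
def pvLoopB (a b : List Char) : Bool :=
  match a, b with
  | [], [] => true
  | [], _ :: _ => false
  | _ :: _, [] => false
  | x :: xs, y :: ys => if x ≠ '_' ∧ x ≠ y then false else pvLoopB xs ys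

def match_with_gaps_alt (my_word : String) (other_word : String) : Bool :=
  pvLoopB (PySem.Str.replace my_word " " "").toList.reverse other_word.toList.reverse

-- ===== PRECONDITION & SPEC =====
def Spec_match_with_gaps (my_word : String) (other_word : String) (out : Bool) : Prop := out = match_with_gaps_alt my_word other_word
instance (my_word : String) (other_word : String) (out : Bool) : Decidable (Spec_match_with_gaps my_word other_word out) := by unfold Spec_match_with_gaps; infer_instance

-- ===== CLAIM (what is proved, stated in full; the proofs are below) =====
def Claim_equal_match_with_gaps : Prop := ∀ (my_word : String) (other_word : String), Dom_match_with_gaps my_word other_word → Spec_match_with_gaps my_word other_word (match_with_gaps my_word other_word)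

-- ===== LEMMAS AND PROOFS =====

-- common characterisation: equal lengths and pointwise match
def pvP (xs ys : List Char) : Bool :=
  (xs.length == ys.length) && (xs.zip ys).all (fun p => p.1 == '_' || p.1 == p.2)

theorem pvLoopB_eq_pvP : ∀ (xs ys : List Char), pvLoopB xs ys = pvP xs ys := by
  intro xs
  induction xs with
  | nil => intro ys; cases ys <;> simp [pvLoopB, pvP]
  | cons x xs ih =>
    intro ys
    cases ys with
    | nil => simp [pvLoopB, pvP]
    | cons y ys =>
      simp only [pvLoopB, ih, pvP, List.zip_cons_cons, List.all_cons, List.length_cons]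
      by_cases hx : x = '_' <;> by_cases hxy : x = y <;>
        simp [hx, hxy, Bool.and_left_comm]

theorem pvZip_reverse : ∀ (xs ys : List Char), xs.length = ys.length →
    xs.reverse.zip ys.reverse = (xs.zip ys).reverse := by
  intro xs
  induction xs with
  | nil => intro ys h; cases ys <;> simp_all
  | cons x xs ih =>
    intro ys h
    cases ys with
    | nil => simp_all
    | cons y ys =>
      have hl : xs.length = ys.length := by simpa using h
      rw [List.reverse_cons, List.reverse_cons,
        List.zip_append (by simp [hl]), ih ys hl]
      simp

theorem pvP_reverse : ∀ (xs ys : List Char), pvP xs.reverse ys.reverse = pvP xs ys := by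
  intro xs ys
  unfold pvP
  by_cases h : xs.length = ys.length
  · simp [h, pvZip_reverse xs ys h]
  · have hb : (xs.length == ys.length) = false := by simpa using h
    simp [hb]

theorem pvLoopA_eq (w o : List Char) (hlen : w.length = o.length) :
    ∀ (rest : List Char) (j : Nat), w.drop j = rest →
      pvLoopA w o rest j = (rest.zip (o.drop j)).all (fun p => p.1 == '_' || p.1 == p.2) := by
  intro rest
  induction rest with
  | nil => intro j _; simp [pvLoopA]
  | cons i rs ih =>
    intro j hdrop
    have hj : j < w.length := by
      by_contra hge
      simp [List.drop_eq_nil_of_le (Nat.le_of_not_lt hge)] at hdrop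
    have hjo : j < o.length := hlen ▸ hj
    have hw : PySem.List.pyGet? w (j : Int) = some w[j] := by
      simp [PySem.List.pyGet?_natCast, List.getElem?_eq_getElem hj]
    have hoo : PySem.List.pyGet? o (j : Int) = some o[j] := by
      simp [PySem.List.pyGet?_natCast, List.getElem?_eq_getElem hjo]
    have hcons : w[j] :: w.drop (j + 1) = i :: rs := by
      rw [← List.drop_eq_getElem_cons hj, hdrop]
    have hwi : w[j] = i := (List.cons.injEq _ _ _ _ ▸ hcons).1
    have hdrop' : w.drop (j + 1) = rs := (List.cons.injEq _ _ _ _ ▸ hcons).2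
    have ho : o.drop j = o[j] :: o.drop (j + 1) := by
      exact (List.drop_eq_getElem_cons hjo)
    rw [ho]
    simp only [pvLoopA, hw, hoo, List.zip_cons_cons, List.all_cons, hwi]
    by_cases hx : i = '_'
    · simp [hx, ih (j + 1) hdrop']
    · by_cases hxy : i = o[j] <;> simp [hx, hxy, ih (j + 1) hdrop']

-- ===== VERDICT (by name: the statement is the Claim_ definition above) =====
theorem pvMain (w o : List Char) :
    (if w.length ≠ o.length then false else pvLoopA w o w 0) = pvP w o := by
  by_cases h : w.length = o.length
  · have hA := pvLoopA_eq w o h w 0 rfl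
    simp [h, pvP, hA]
  · have hb : (w.length == o.length) = false := by simpa using h
    simp [pvP, h, hb]

theorem match_with_gaps_spec : Claim_equal_match_with_gaps := by
  intro my_word other_word _
  unfold Spec_match_with_gaps match_with_gaps match_with_gaps_alt
  rw [pvLoopB_eq_pvP, pvP_reverse,
    ← pvMain (PySem.Str.replace my_word " " "").toList other_word.toList]
  simp
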